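-- pv_equiv track=rewrite | github.com/isoomni/coding-test | soom/문자열/20437_문자열게임2.py | string_game
-- ===== SOURCE A (Python) =====
-- from collections import defaultdict
--
-- def string_game(W, K):
--     if K == 1:  # k가 1이면 문자열은 무조건 1
--         return [1, 1]
--     alphabet = defaultdict(int)  # 각 알파벳의 숫자를 담을 딕셔너리
--     interval = []
--
--     for i in W:
--         alphabet[i] += 1
--     for key, value in alphabet.items():
--         if value >= K:  # 알파벳 중 숫자가 k개 이상인 것만 보이위해
--             index_list = list(filter(lambda x: W[x] == key, range(len(W))))
--
--             for j in range(len(index_list)-K+1): # 알파벳 인덱스 사이 길이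
--                 interval.append(index_list[j+K-1] - index_list[j])
--
--     if not interval:  # 검색 실패
--         return [-1]
--     return [min(interval)+1, max(interval)+1]
-- ===== SOURCE B (Python) =====
-- def string_game(W, K):
--     if K == 1:
--         return [1, 1]
--     pos = {}
--     interval = []
--     for i, ch in enumerate(W):
--         ps = pos.setdefault(ch, [])
--         ps.append(i)
--         if len(ps) >= K:
--             interval.append(i - ps[len(ps) - K])
--     if not interval:
--         return [-1]
--     return [min(interval) + 1, max(interval) + 1]
-- ===== Notes on version B (the rewrite author's own statement) =====
-- stated objective: alternative
-- what changed: B is a single pass over enumerate(W): it grows each character's position list as it scans and emits each window distance i - ps[-K] the moment its right endpoint i is reached, instead of A's two-stage count-then-rescan with a separate window loop per qualifying character.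
import Mathlib
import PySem

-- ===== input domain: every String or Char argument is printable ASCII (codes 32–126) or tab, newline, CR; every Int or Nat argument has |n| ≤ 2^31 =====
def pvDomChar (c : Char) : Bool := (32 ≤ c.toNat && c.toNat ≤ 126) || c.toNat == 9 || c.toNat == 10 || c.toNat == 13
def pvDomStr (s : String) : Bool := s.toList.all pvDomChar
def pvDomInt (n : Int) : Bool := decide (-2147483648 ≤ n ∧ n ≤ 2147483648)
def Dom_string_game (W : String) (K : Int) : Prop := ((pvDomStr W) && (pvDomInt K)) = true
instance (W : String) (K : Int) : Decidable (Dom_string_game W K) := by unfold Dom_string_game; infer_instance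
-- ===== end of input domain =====

-- B replaces A's count-then-rescan-per-character structure by a single pass over enumerate(W)
-- that emits each window distance when its right endpoint is scanned; same return value.

-- ===== PORT A =====
def string_game (W : String) (K : Int) : List Int :=
  if K == 1 then [1, 1] else
    let chars := W.toList
    -- for i in W: alphabet[i] += 1   (defaultdict(int))
    let alphabet := chars.foldl (fun d c => d.modify c 0 (fun v => v + 1))
      (PySem.Dict.empty : PySem.Dict Char Int)
    -- for key, value in alphabet.items(): …
    let interval := alphabet.items.foldl (fun acc kv =>
      if kv.2 ≥ K then
        -- index_list = list(filter(lambda x: W[x] == key, range(len(W))));  W[x] is in range here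
        let indexList := (PySem.List.pyRange 0 (PySem.List.len chars) 1).filter
          (fun x => PySem.List.pyGetD chars x ' ' == kv.1)
        (PySem.List.pyRange 0 (PySem.List.len indexList - K + 1) 1).foldl
          (fun acc2 j => acc2 ++
            [PySem.List.pyGetD indexList (j + K - 1) 0 - PySem.List.pyGetD indexList j 0]) acc
      else acc) []
    if interval = [] then [-1]
    else [(PySem.List.min? interval (fun x => x)).getD 0 + 1,
          (PySem.List.max? interval (fun x => x)).getD 0 + 1]

-- ===== PORT B =====
def string_game_alt (W : String) (K : Int) : List Int :=
  if K == 1 then [1, 1] else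
    -- ONE pass: for i, ch in enumerate(W): ps = pos.setdefault(ch,[]); ps.append(i);
    --           if len(ps) >= K: interval.append(i - ps[len(ps)-K])
    let st := (PySem.List.enumerate W.toList).foldl
      (fun (st : PySem.Dict Char (List Int) × List Int) p =>
        let ps := st.1.getD p.2 [] ++ [p.1]
        (st.1.insert p.2 ps,
         if K ≤ PySem.List.len ps then
           st.2 ++ [p.1 - PySem.List.pyGetD ps (PySem.List.len ps - K) 0]
         else st.2))
      ((PySem.Dict.empty : PySem.Dict Char (List Int)), ([] : List Int))
    if st.2 = [] then [-1]
    else [(PySem.List.min? st.2 (fun x => x)).getD 0 + 1,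
          (PySem.List.max? st.2 (fun x => x)).getD 0 + 1]

-- ===== PRECONDITION & SPEC =====
-- Pre_ excludes exactly the inputs on which A raises IndexError (K ≤ 0 with a nonempty W,
-- where the inner loop indexes past the position list); B raises there too.
def Pre_string_game (W : String) (K : Int) : Prop := 1 ≤ K ∨ W = ""
instance (W : String) (K : Int) : Decidable (Pre_string_game W K) := by
  unfold Pre_string_game; infer_instance
def pvWitness_string_game : String × Int := ("aabcbb", 2)

def Spec_string_game (W : String) (K : Int) (out : List Int) : Prop := out = string_game_alt W K
instance (W : String) (K : Int) (out : List Int) : Decidable (Spec_string_game W K out) := by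
  unfold Spec_string_game; infer_instance

-- ===== CLAIM (what is proved, stated in full; the proofs are below) =====
def Claim_equal_string_game : Prop := ∀ (W : String) (K : Int),
  Dom_string_game W K → Pre_string_game W K → Spec_string_game W K (string_game W K)

-- ===== LEMMAS AND PROOFS =====

-- positions of character c in cs (0-based, as Ints)
def pvPos (c : Char) (cs : List Char) : List Int :=
  ((PySem.List.enumerate cs).filter (fun p => p.2 == c)).map (fun p => p.1)

-- the window distances A computes for one position list
def pvWin (K : Int) (ps : List Int) : List Int :=
  (PySem.List.pyRange 0 (PySem.List.len ps - K + 1) 1).map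
    (fun j => PySem.List.pyGetD ps (j + K - 1) 0 - PySem.List.pyGetD ps j 0)

-- B's loop state after scanning cs
def pvBst (K : Int) (cs : List Char) : PySem.Dict Char (List Int) × List Int :=
  (PySem.List.enumerate cs).foldl
    (fun (st : PySem.Dict Char (List Int) × List Int) p =>
      let ps := st.1.getD p.2 [] ++ [p.1]
      (st.1.insert p.2 ps,
       if K ≤ PySem.List.len ps then
         st.2 ++ [p.1 - PySem.List.pyGetD ps (PySem.List.len ps - K) 0]
       else st.2))
    ((PySem.Dict.empty : PySem.Dict Char (List Int)), ([] : List Int))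

-- A's interval as a flatMap over the distinct characters
def pvAflat (K : Int) (cs : List Char) : List Int :=
  (PySem.Set.ofList cs).flatMap (fun c => pvWin K (pvPos c cs))

theorem pv_items_eq_keys_map {κ ν : Type} [BEq κ] [LawfulBEq κ]
    (d : PySem.Dict κ ν) (v0 : ν) (h : d.keys.Nodup) :
    d.items = d.keys.map (fun k => (k, d.getD k v0)) := by
  obtain ⟨l⟩ := d
  induction l with
  | nil => rfl
  | cons p rest ih =>
    obtain ⟨k, v⟩ := p
    simp only [PySem.Dict.keys, List.map_cons, List.nodup_cons, List.mem_map] at h ⊢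
    obtain ⟨hk, hrest⟩ := h
    have hself : (PySem.Dict.mk ((k, v) :: rest)).getD k v0 = v := by
      simp [PySem.Dict.getD, PySem.Dict.get?]
    have hstep : ∀ k' ∈ rest.map (fun x => x.1),
        (PySem.Dict.mk ((k, v) :: rest)).getD k' v0 = (PySem.Dict.mk rest).getD k' v0 := by
      intro k' hk'
      simp only [List.mem_map] at hk'
      obtain ⟨a, ha, rfl⟩ := hk'
      have hne : (k == a.1) = false := by
        rw [beq_eq_false_iff_ne]; intro he; exact hk ⟨a, ha, he.symm⟩
      simp [PySem.Dict.getD, PySem.Dict.get?, List.find?, hne]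
    have ih' := ih hrest
    simp only [PySem.Dict.keys] at ih'
    have hmap : List.map (fun k' => (k', (PySem.Dict.mk ((k, v) :: rest)).getD k' v0))
          (rest.map (fun x => x.1))
        = List.map (fun k' => (k', (PySem.Dict.mk rest).getD k' v0)) (rest.map (fun x => x.1)) :=
      List.map_congr_left (fun k' hk' => by rw [hstep k' hk'])
    rw [hself, hmap, ← ih']

theorem pv_filter_range_eq (chars : List Char) (c : Char) :
    (PySem.List.pyRange 0 (PySem.List.len chars) 1).filter
        (fun x => PySem.List.pyGetD chars x ' ' == c)
      = pvPos c chars := by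
  unfold pvPos
  rw [PySem.List.enumerate_eq_map_pyRange chars ' ', List.filter_map, List.map_map]
  simp only [Function.comp_def]
  rw [List.map_id']

theorem pv_keysA (chars : List Char) :
    ((chars.foldl (fun d c => d.modify c 0 (fun v => v + 1))
      (PySem.Dict.empty : PySem.Dict Char Int))).keys = PySem.Set.ofList chars := by
  rw [PySem.Dict.keys_foldl_modify chars 0 (fun _ _ => fun v => v + 1) PySem.Dict.empty]
  have : (PySem.Dict.empty : PySem.Dict Char Int).keys = [] := rfl
  rw [this, PySem.Set.update_eq_append_filter]
  simp [PySem.Set.contains]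

theorem pv_getD_A (chars : List Char) (c : Char) :
    ((chars.foldl (fun d c => d.modify c 0 (fun v => v + 1))
      (PySem.Dict.empty : PySem.Dict Char Int))).getD c 0 = (chars.count c : Int) := by
  rw [PySem.Dict.getD_foldl_modify_add_one]
  have : (PySem.Dict.empty : PySem.Dict Char Int).getD c 0 = 0 := rfl
  rw [this, zero_add]

theorem pv_len_pos (chars : List Char) (c : Char) :
    (chars.count c : Int) = PySem.List.len (pvPos c chars) := by
  simp only [pvPos, PySem.List.len, List.length_map]
  congr 1
  rw [List.count, ← List.countP_eq_length_filter]
  conv_lhs => rw [← PySem.List.map_snd_enumerate chars 0]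
  rw [List.countP_map]
  simp [Function.comp_def]

theorem pvWin_empty_of_len_lt (K : Int) (ps : List Int)
    (h : PySem.List.len ps < K) : pvWin K ps = [] := by
  unfold pvWin
  rw [PySem.List.pyRange_one_eq_nil (by omega)]
  rfl

-- A's interval equals pvAflat (the count-guard is redundant for 2 ≤ K)
theorem pv_A_char (chars : List Char) (K : Int) :
    ((chars.foldl (fun d c => d.modify c 0 (fun v => v + 1))
        (PySem.Dict.empty : PySem.Dict Char Int)).items.foldl
      (fun acc kv =>
        if kv.2 ≥ K then
          let indexList := (PySem.List.pyRange 0 (PySem.List.len chars) 1).filter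
            (fun x => PySem.List.pyGetD chars x ' ' == kv.1)
          (PySem.List.pyRange 0 (PySem.List.len indexList - K + 1) 1).foldl
            (fun acc2 j => acc2 ++
              [PySem.List.pyGetD indexList (j + K - 1) 0 - PySem.List.pyGetD indexList j 0]) acc
        else acc) ([] : List Int))
    = pvAflat K chars := by
  have nA : ((chars.foldl (fun d c => d.modify c 0 (fun v => v + 1))
      (PySem.Dict.empty : PySem.Dict Char Int))).keys.Nodup := by
    rw [pv_keysA]; exact PySem.Set.nodup_ofList _
  rw [pv_items_eq_keys_map _ 0 nA, pv_keysA, List.foldl_map]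
  rw [PySem.List.foldl_congr_mem (PySem.Set.ofList chars) _
    (fun (acc : List Int) (c : Char) => acc ++ pvWin K (pvPos c chars)) [] ?_]
  · rw [PySem.List.foldl_append_eq_flatMap]
    simp [pvAflat]
  · intro acc c hc
    simp only [pv_getD_A, pv_filter_range_eq]
    by_cases hcnt : (chars.count c : Int) ≥ K
    · rw [if_pos hcnt, PySem.List.foldl_append_singleton_eq_map]
      rfl
    · rw [if_neg hcnt]
      have hlt : PySem.List.len (pvPos c chars) < K := by
        rw [← pv_len_pos]; omega
      rw [pvWin_empty_of_len_lt K _ hlt, List.append_nil]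

-- pvPos after appending one character
theorem pv_pos_append (c' c : Char) (cs : List Char) :
    pvPos c' (cs ++ [c]) = pvPos c' cs ++ (if c' = c then [(cs.length : Int)] else []) := by
  unfold pvPos
  rw [PySem.List.enumerate_append, List.filter_append, List.map_append]
  congr 1
  rw [PySem.List.enumerate_cons, PySem.List.enumerate_nil]
  by_cases h : c' = c
  · subst h; simp
  · rw [if_neg h]
    have : (c == c') = false := by
      rw [beq_eq_false_iff_ne]; exact fun he => h he.symm
    simp [this]

theorem pv_pos_of_not_mem (c : Char) (cs : List Char) (h : c ∉ cs) : pvPos c cs = [] := by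
  unfold pvPos
  rw [List.filter_eq_nil_iff.mpr, List.map_nil]
  intro p hp
  rcases (PySem.List.mem_enumerate_iff _ _ _).mp hp with ⟨k, hk, rfl⟩
  simp only []
  intro he
  exact h ((eq_of_beq he) ▸ List.getElem_mem hk)

-- stability of pyGetD under appending on the right, for in-range nonnegative indices
theorem pv_pyGetD_append (ps : List Int) (x : Int) (i : Int) (d : Int)
    (h0 : 0 ≤ i) (h1 : i < (ps.length : Int)) :
    PySem.List.pyGetD (ps ++ [x]) i d = PySem.List.pyGetD ps i d := by
  have h2 : i < ((ps ++ [x]).length : Int) := by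
    simp only [List.length_append, List.length_singleton]; push_cast; omega
  rw [PySem.List.pyGetD_eq_getElem _ d h0 h2, PySem.List.pyGetD_eq_getElem _ d h0 h1]
  rw [List.getElem_append_left]

-- one more position appends (at most) one more window, in B's exact shape
theorem pv_win_append (K : Int) (hK : 2 ≤ K) (ps : List Int) (x : Int) :
    pvWin K (ps ++ [x]) = pvWin K ps ++
      (if K ≤ PySem.List.len (ps ++ [x]) then
        [x - PySem.List.pyGetD (ps ++ [x]) (PySem.List.len (ps ++ [x]) - K) 0]
      else []) := by
  unfold pvWin
  have hlen : PySem.List.len (ps ++ [x]) = (ps.length : Int) + 1 := by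
    simp [PySem.List.len]
  rw [hlen]
  by_cases h : K ≤ (ps.length : Int) + 1
  · rw [if_pos h]
    have e1 : (ps.length : Int) + 1 - K + 1 = ((ps.length : Int) + 1 - K) + 1 := by ring
    rw [e1, PySem.List.pyRange_one_succ_right (by omega), List.map_append,
        show PySem.List.len ps - K + 1 = (ps.length : Int) + 1 - K from by
          simp [PySem.List.len]; ring]
    congr 1
    · apply List.map_congr_left
      intro j hj
      rcases (PySem.List.mem_pyRange_one).mp hj with ⟨hj0, hj1⟩
      rw [pv_pyGetD_append ps x _ _ (by omega) (by omega),
          pv_pyGetD_append ps x _ _ (by omega) (by omega)]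
    · have hx : PySem.List.pyGetD (ps ++ [x]) ((ps.length : Int) + 1 - K + (K - 1)) 0 = x := by
        have e2 : (ps.length : Int) + 1 - K + (K - 1) = (ps.length : Int) := by ring
        rw [e2, PySem.List.pyGetD_eq_getElem _ 0 (by omega)
          (by simp only [List.length_append, List.length_singleton]; push_cast; omega)]
        simp
      simp only [List.map_cons, List.map_nil]
      rw [show (ps.length : Int) + 1 - K + K - 1 = (ps.length : Int) + 1 - K + (K - 1) by ring, hx]
  · rw [if_neg h, PySem.List.pyRange_one_eq_nil (by omega),
        PySem.List.pyRange_one_eq_nil (by simp only [PySem.List.len]; omega)]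
    simp

theorem pv_win_nil (K : Int) (hK : 2 ≤ K) : pvWin K [] = [] := by
  exact pvWin_empty_of_len_lt K [] (by simp [PySem.List.len]; omega)

-- B's dict tracks pvPos
theorem pv_Bst_dict (K : Int) (cs : List Char) : ∀ (c : Char),
    (pvBst K cs).1.getD c [] = pvPos c cs := by
  induction cs using List.reverseRecOn with
  | nil => intro c; rfl
  | append_singleton cs a ih =>
    intro c
    have hstep : pvBst K (cs ++ [a]) =
        ((pvBst K cs).1.insert a ((pvBst K cs).1.getD a [] ++ [(cs.length : Int)]),
         if K ≤ PySem.List.len ((pvBst K cs).1.getD a [] ++ [(cs.length : Int)]) then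
           (pvBst K cs).2 ++ [(cs.length : Int) -
             PySem.List.pyGetD ((pvBst K cs).1.getD a [] ++ [(cs.length : Int)])
               (PySem.List.len ((pvBst K cs).1.getD a [] ++ [(cs.length : Int)]) - K) 0]
         else (pvBst K cs).2) := by
      unfold pvBst
      rw [PySem.List.enumerate_append, List.foldl_append,
          PySem.List.enumerate_cons, PySem.List.enumerate_nil]
      simp
    rw [hstep]
    simp only [PySem.Dict.getD_insert, ih a, pv_pos_append]
    by_cases h : c = a
    · rw [if_pos h, if_pos h, h]
    · rw [if_neg h, if_neg h, ih c, List.append_nil]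

-- flatMap where exactly one (distinct) element's image gains a suffix
theorem pv_flatMap_perm (l : List Char) (f g : Char → List Int) (c : Char) (d : List Int)
    (hl : l.Nodup) (hc : c ∈ l) (hfg : ∀ x ∈ l, x ≠ c → g x = f x) (hgc : g c = f c ++ d) :
    (l.flatMap g).Perm (l.flatMap f ++ d) := by
  induction l with
  | nil => cases hc
  | cons a t ih =>
    rcases List.nodup_cons.mp hl with ⟨ha, ht⟩
    simp only [List.flatMap_cons]
    by_cases hac : a = c
    · subst hac
      have hgt : t.flatMap g = t.flatMap f := by
        simp only [List.flatMap_def]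
        exact congrArg List.flatten (List.map_congr_left
          (fun x hx => hfg x (List.mem_cons_of_mem _ hx) (fun he => ha (he ▸ hx))))
      rw [hgc, hgt, List.append_assoc, List.append_assoc]
      exact List.Perm.append_left (f a) List.perm_append_comm
    · have hga : g a = f a := hfg a (List.mem_cons_self) hac
      have hct : c ∈ t := by
        rcases List.mem_cons.mp hc with h | h
        · exact absurd h.symm hac
        · exact h
      have hp := ih ht hct (fun x hx => hfg x (List.mem_cons_of_mem _ hx))
      rw [hga]
      have h2 := List.Perm.append_left (f a) hp
      rwa [← List.append_assoc] at h2

-- B's interval is a permutation of A's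
theorem pv_perm (K : Int) (hK : 2 ≤ K) (cs : List Char) :
    (pvBst K cs).2.Perm (pvAflat K cs) := by
  induction cs using List.reverseRecOn with
  | nil => simp [pvBst, pvAflat, PySem.List.enumerate_nil, PySem.Set.ofList]
  | append_singleton cs a ih =>
    have hstep : pvBst K (cs ++ [a]) =
        ((pvBst K cs).1.insert a ((pvBst K cs).1.getD a [] ++ [(cs.length : Int)]),
         if K ≤ PySem.List.len ((pvBst K cs).1.getD a [] ++ [(cs.length : Int)]) then
           (pvBst K cs).2 ++ [(cs.length : Int) -
             PySem.List.pyGetD ((pvBst K cs).1.getD a [] ++ [(cs.length : Int)])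
               (PySem.List.len ((pvBst K cs).1.getD a [] ++ [(cs.length : Int)]) - K) 0]
         else (pvBst K cs).2) := by
      unfold pvBst
      rw [PySem.List.enumerate_append, List.foldl_append,
          PySem.List.enumerate_cons, PySem.List.enumerate_nil]
      simp
    have hd : (pvBst K cs).1.getD a [] = pvPos a cs := pv_Bst_dict K cs a
    have hB : (pvBst K (cs ++ [a])).2 = (pvBst K cs).2 ++
        (if K ≤ PySem.List.len (pvPos a cs ++ [(cs.length : Int)]) then
          [(cs.length : Int) - PySem.List.pyGetD (pvPos a cs ++ [(cs.length : Int)])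
            (PySem.List.len (pvPos a cs ++ [(cs.length : Int)]) - K) 0]
        else []) := by
      rw [hstep]
      simp only [hd]
      split_ifs <;> simp
    have hA : (pvAflat K (cs ++ [a])).Perm (pvAflat K cs ++
        (if K ≤ PySem.List.len (pvPos a cs ++ [(cs.length : Int)]) then
          [(cs.length : Int) - PySem.List.pyGetD (pvPos a cs ++ [(cs.length : Int)])
            (PySem.List.len (pvPos a cs ++ [(cs.length : Int)]) - K) 0]
        else [])) := by
      unfold pvAflat
      by_cases hm : a ∈ cs
      · rw [PySem.Set.ofList_append_singleton,
            PySem.Set.add_of_mem ((PySem.Set.mem_ofList _ _).mpr hm)]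
        apply pv_flatMap_perm _ _ _ a _ (PySem.Set.nodup_ofList _)
          ((PySem.Set.mem_ofList _ _).mpr hm)
        · intro x _ hxa
          rw [pv_pos_append, if_neg hxa, List.append_nil]
        · rw [pv_pos_append, if_pos rfl, pv_win_append K hK]
      · rw [PySem.Set.ofList_append_singleton,
            PySem.Set.add_of_not_mem (fun hax => hm ((PySem.Set.mem_ofList _ _).mp hax)),
            List.flatMap_append]
        have h1 : (PySem.Set.ofList cs).flatMap (fun c => pvWin K (pvPos c (cs ++ [a])))
            = (PySem.Set.ofList cs).flatMap (fun c => pvWin K (pvPos c cs)) := by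
          simp only [List.flatMap_def]
          refine congrArg List.flatten (List.map_congr_left ?_)
          intro x hx
          have hxa : x ≠ a := fun he => hm (he ▸ (PySem.Set.mem_ofList _ _).mp hx)
          rw [pv_pos_append, if_neg hxa, List.append_nil]
        have h2 : ([a].flatMap (fun c => pvWin K (pvPos c (cs ++ [a]))))
            = (if K ≤ PySem.List.len (pvPos a cs ++ [(cs.length : Int)]) then
                [(cs.length : Int) - PySem.List.pyGetD (pvPos a cs ++ [(cs.length : Int)])
                  (PySem.List.len (pvPos a cs ++ [(cs.length : Int)]) - K) 0]
              else []) := by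
          simp only [List.flatMap_cons, List.flatMap_nil, List.append_nil]
          rw [pv_pos_append, if_pos rfl, pv_win_append K hK,
              pv_pos_of_not_mem a cs hm, pv_win_nil K hK, List.nil_append, List.nil_append]
        rw [h1, h2]
    exact (hB ▸ (ih.append_right _)).trans hA.symm

-- the trailing min/max formatting-- the trailing min/max formatting

-- the trailing min/max formatting only depends on the multiset
theorem pv_fin_eq (l1 l2 : List Int) (h : l1.Perm l2) :
    (if l1 = [] then [(-1 : Int)]
     else [(PySem.List.min? l1 (fun x => x)).getD 0 + 1,
           (PySem.List.max? l1 (fun x => x)).getD 0 + 1])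
    = (if l2 = [] then [(-1 : Int)]
       else [(PySem.List.min? l2 (fun x => x)).getD 0 + 1,
             (PySem.List.max? l2 (fun x => x)).getD 0 + 1]) := by
  by_cases h1 : l1 = []
  · have h2 : l2 = [] := by
      subst h1; exact h.nil_eq.symm
    rw [if_pos h1, if_pos h2]
  · have h2 : l2 ≠ [] := fun he => h1 (by subst he; exact h.symm.nil_eq.symm)
    rw [if_neg h1, if_neg h2]
    cases hmin1 : PySem.List.min? l1 (fun x => x) with
    | none => exact absurd ((PySem.List.min?_eq_none_iff _ _).mp hmin1) h1
    | some m1 =>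
    cases hmin2 : PySem.List.min? l2 (fun x => x) with
    | none => exact absurd ((PySem.List.min?_eq_none_iff _ _).mp hmin2) h2
    | some m2 =>
    cases hmax1 : PySem.List.max? l1 (fun x => x) with
    | none => exact absurd ((PySem.List.max?_eq_none_iff _ _).mp hmax1) h1
    | some M1 =>
    cases hmax2 : PySem.List.max? l2 (fun x => x) with
    | none => exact absurd ((PySem.List.max?_eq_none_iff _ _).mp hmax2) h2
    | some M2 =>
    have hm : m1 = m2 := le_antisymm
      (PySem.List.min?_isMin hmin1 m2 (h.mem_iff.mpr (PySem.List.min?_mem hmin2)))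
      (PySem.List.min?_isMin hmin2 m1 (h.mem_iff.mp (PySem.List.min?_mem hmin1)))
    have hM : M1 = M2 := le_antisymm
      (PySem.List.max?_isMax hmax2 M1 (h.mem_iff.mp (PySem.List.max?_mem hmax1)))
      (PySem.List.max?_isMax hmax1 M2 (h.mem_iff.mpr (PySem.List.max?_mem hmax2)))
    simp [hm, hM]

-- ===== VERDICT (by name: the statement is the Claim_ definition above) =====
theorem string_game_spec : Claim_equal_string_game := by
  intro W K _ hpre
  unfold Spec_string_game
  by_cases hK1 : (K == 1) = true
  · simp only [string_game, string_game_alt, hK1, if_true]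
  · simp only [Bool.not_eq_true] at hK1
    simp only [string_game, string_game_alt, hK1, Bool.false_eq_true, if_false]
    by_cases hW : W = ""
    · subst hW; rfl
    · have h2K : 2 ≤ K := by
        have hne : K ≠ 1 := by
          intro he; rw [he] at hK1; simp at hK1
        rcases hpre with hk | hw
        · omega
        · exact absurd hw hW
      rw [pv_A_char W.toList K]
      exact pv_fin_eq _ _ ((pv_perm K h2K W.toList).symm)
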